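-- pv_equiv track=rewrite | github.com/petko92/SoftUni-Courses | 04-functions/4_odd_and_even_sum.py | sum_even_odd_digits
-- ===== SOURCE A (Python) =====
-- def sum_even_odd_digits(number:int) -> str:
--     odd_sum = 0
--     even_sum = 0
--
--     for n in str(abs(number)):
--         digit = int(n)
--
--         if digit % 2 == 0:
--             even_sum += digit
--         else:
--             odd_sum += digit
--
--     return f"Odd sum = {odd_sum}, Even sum = {even_sum}"
-- ===== SOURCE B (Python) =====
-- def sum_even_odd_digits(number: int) -> str:
--     n = abs(number)
--     odd_sum = 0
--     even_sum = 0
--     while n > 0: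
--         d = n % 10
--         if d % 2 == 0:
--             even_sum += d
--         else:
--             odd_sum += d
--         n //= 10
--     return f"Odd sum = {odd_sum}, Even sum = {even_sum}"
-- ===== Notes on version B (the rewrite author's own statement) =====
-- stated objective: alternative
-- what changed: digits are extracted arithmetically (n % 10 / n //= 10 loop) instead of converting the number to a string and parsing each character back to an int
import Mathlib
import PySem

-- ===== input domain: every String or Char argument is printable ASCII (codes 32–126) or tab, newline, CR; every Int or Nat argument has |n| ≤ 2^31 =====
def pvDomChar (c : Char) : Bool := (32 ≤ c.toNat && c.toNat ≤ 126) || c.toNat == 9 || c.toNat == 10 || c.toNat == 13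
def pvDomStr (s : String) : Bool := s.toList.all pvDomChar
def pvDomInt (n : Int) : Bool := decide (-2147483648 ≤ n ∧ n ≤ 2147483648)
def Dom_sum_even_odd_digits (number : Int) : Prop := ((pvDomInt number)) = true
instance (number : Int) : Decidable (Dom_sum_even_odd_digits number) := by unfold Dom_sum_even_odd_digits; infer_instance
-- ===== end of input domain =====

-- B extracts the digits arithmetically (n % 10, n //= 10) instead of iterating over str(abs(number));
-- same result for every int (the 0 case yields "Odd sum = 0, Even sum = 0" either way).

-- ===== PORT A =====
-- one step of A's for-loop over the characters of str(abs(number))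
def digitStep (p : Int × Int) (c : Char) : Int × Int :=
  -- int(n) where n is one character of str(abs(number)): always a decimal digit
  -- character there, so int(n) = code − 48 exactly
  let digit : Int := (c.toNat : Int) - 48
  if PySem.Int.mod digit 2 == 0 then (p.1, p.2 + digit) else (p.1 + digit, p.2)

def sum_even_odd_digits (number : Int) : String :=
  let p := (PySem.Int.toStr |number|).toList.foldl digitStep (0, 0)
  "Odd sum = " ++ PySem.Int.toStr p.1 ++ ", Even sum = " ++ PySem.Int.toStr p.2

-- ===== PORT B =====
-- the while-loop of B; n = abs(number) stays nonnegative throughout, so Nat's % and /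
-- coincide with Python's % and // here
def sumEvenOddLoop (n : Nat) (odd_sum even_sum : Int) : Int × Int :=
  if h : n = 0 then (odd_sum, even_sum)
  else
    let d := n % 10
    if d % 2 == 0 then sumEvenOddLoop (n / 10) odd_sum (even_sum + (d : Int))
    else sumEvenOddLoop (n / 10) (odd_sum + (d : Int)) even_sum
termination_by n
decreasing_by all_goals exact Nat.div_lt_self (Nat.pos_of_ne_zero h) (by norm_num)

def sum_even_odd_digits_alt (number : Int) : String :=
  let p := sumEvenOddLoop number.natAbs 0 0
  "Odd sum = " ++ PySem.Int.toStr p.1 ++ ", Even sum = " ++ PySem.Int.toStr p.2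

-- ===== PRECONDITION & SPEC =====
def Spec_sum_even_odd_digits (number : Int) (out : String) : Prop := out = sum_even_odd_digits_alt number
instance (number : Int) (out : String) : Decidable (Spec_sum_even_odd_digits number out) := by unfold Spec_sum_even_odd_digits; infer_instance

-- ===== CLAIM (what is proved, stated in full; the proofs are below) =====
def Claim_equal_sum_even_odd_digits : Prop := ∀ (number : Int), Dom_sum_even_odd_digits number → Spec_sum_even_odd_digits number (sum_even_odd_digits number)

-- ===== LEMMAS AND PROOFS =====

-- reference value: (sum of odd digits, sum of even digits) of n, by low-to-high recursion
def digitSums (n : Nat) : Int × Int :=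
  if h : n = 0 then (0, 0)
  else
    let d := n % 10
    let r := digitSums (n / 10)
    if d % 2 = 0 then (r.1, r.2 + (d : Int)) else (r.1 + (d : Int), r.2)
termination_by n
decreasing_by all_goals exact Nat.div_lt_self (Nat.pos_of_ne_zero h) (by norm_num)

lemma digitChar_val (d : Nat) (hd : d < 10) : ((Nat.digitChar d).toNat : Int) - 48 = (d : Int) := by
  interval_cases d <;> decide

lemma digitStep_eq (p : Int × Int) (d : Nat) (hd : d < 10) :
    digitStep p (Nat.digitChar d) =
      if d % 2 = 0 then (p.1, p.2 + (d : Int)) else (p.1 + (d : Int), p.2) := by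
  simp only [digitStep, digitChar_val d hd,
    PySem.Int.mod_eq_emod_of_pos (show (0:Int) < 2 by norm_num)]
  rcases Nat.mod_two_eq_zero_or_one d with h | h
  · have h2 : (d : Int) % 2 = 0 := by omega
    simp [h2, h]
  · have h2 : (d : Int) % 2 = 1 := by omega
    simp [h2, h]

lemma foldl_digitStep (n : Nat) : ∀ o e : Int,
    List.foldl digitStep (o, e) (Nat.toDigits 10 n) = (o + (digitSums n).1, e + (digitSums n).2) := by
  induction n using Nat.strong_induction_on with
  | _ n ih =>
    intro o e
    rw [Nat.toDigits_eq_if (by norm_num)]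
    by_cases hn : n < 10
    · simp only [hn, if_true, List.foldl_cons, List.foldl_nil]
      rw [digitStep_eq _ n hn]
      by_cases h0 : n = 0
      · subst h0; simp [digitSums]
      · unfold digitSums
        rw [dif_neg h0]
        simp only [Nat.mod_eq_of_lt hn, Nat.div_eq_of_lt hn]
        unfold digitSums
        rcases Nat.mod_two_eq_zero_or_one n with h | h <;> simp [h]
    · simp only [hn, if_false, List.foldl_append, List.foldl_cons, List.foldl_nil]
      rw [ih (n / 10) (Nat.div_lt_self (by omega) (by norm_num)) o e]
      rw [digitStep_eq _ (n % 10) (Nat.mod_lt n (by norm_num))]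
      conv_rhs => rw [digitSums, dif_neg (by omega : ¬ n = 0)]
      rcases Nat.mod_two_eq_zero_or_one (n % 10) with h | h <;>
        simp only [h] <;> simp <;> ring

lemma sumEvenOddLoop_eq (n : Nat) : ∀ o e : Int,
    sumEvenOddLoop n o e = (o + (digitSums n).1, e + (digitSums n).2) := by
  induction n using Nat.strong_induction_on with
  | _ n ih =>
    intro o e
    unfold sumEvenOddLoop digitSums
    by_cases h0 : n = 0
    · simp [h0]
    · rw [dif_neg h0, dif_neg h0]
      have hlt := Nat.div_lt_self (Nat.pos_of_ne_zero h0) (by norm_num : 1 < 10)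
      rcases Nat.mod_two_eq_zero_or_one (n % 10) with h | h <;>
        simp only [h] <;> simp [ih (n / 10) hlt] <;> ring

lemma abs_toChars (number : Int) :
    (PySem.Int.toStr |number|).toList = Nat.toDigits 10 number.natAbs := by
  rw [PySem.Int.toList_toStr]
  unfold PySem.Int.toChars
  rw [if_neg (by simp [abs_nonneg number] : ¬ |number| < 0)]
  congr 1
  rcases abs_cases number with ⟨h1, _⟩ | ⟨h1, _⟩ <;> rw [h1] <;> omega

-- ===== VERDICT (by name: the statement is the Claim_ definition above) =====
theorem sum_even_odd_digits_spec : Claim_equal_sum_even_odd_digits := by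
  intro number _
  unfold Spec_sum_even_odd_digits sum_even_odd_digits sum_even_odd_digits_alt
  rw [abs_toChars, foldl_digitStep, sumEvenOddLoop_eq]
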